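-- pv_equiv track=rewrite | github.com/trigoo007/calculadora-turnos | tests/test_fecha_formato.py | format_dates
-- ===== SOURCE A (Python) =====
-- def format_dates(dias):
--     """Test the date formatting logic"""
--     # Formatear elegantemente los días en lenguaje natural
--     if len(dias) == 1:
--         fechas_str = dias[0]
--     elif len(dias) == 2:
--         fechas_str = f"{dias[0]} y {dias[1]}"
--     else:
--         # Ordenar los días numéricamente antes de formatear
--         dias_ordenados = sorted([int(d) for d in dias])
--         dias_str = [str(d) for d in dias_ordenados]
--
--         # Identificar secuencias consecutivas para formato más natural
--         secuencias = []
--         secuencia_actual = [dias_ordenados[0]]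
--
--         for i in range(1, len(dias_ordenados)):
--             if dias_ordenados[i] == dias_ordenados[i-1] + 1:
--                 secuencia_actual.append(dias_ordenados[i])
--             else:
--                 if len(secuencia_actual) > 0:
--                     secuencias.append(secuencia_actual)
--                     secuencia_actual = [dias_ordenados[i]]
--
--         if secuencia_actual:
--             secuencias.append(secuencia_actual)
--
--         # Convertir secuencias a formato de texto
--         partes = []
--         for seq in secuencias:
--             if len(seq) == 1:
--                 partes.append(str(seq[0]))
--             elif len(seq) == 2:
--                 partes.append(f"{seq[0]} y {seq[1]}")
--             else:
--                 partes.append(f"{seq[0]} al {seq[-1]}")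
--
--         # Unir las partes con comas y "y" antes del último elemento
--         if len(partes) == 1:
--             fechas_str = partes[0]
--         elif len(partes) == 2:
--             fechas_str = f"{partes[0]} y {partes[1]}"
--         else:
--             partes_excepto_ultima = partes[:-1]
--             ultima_parte = partes[-1]
--             fechas_str = ", ".join(partes_excepto_ultima) + " y " + ultima_parte
--
--     return fechas_str
-- ===== SOURCE B (Python) =====
-- def _run(lo, hi):
--     if lo == hi:
--         return str(lo)
--     if hi == lo + 1:
--         return f"{lo} y {hi}"
--     return f"{lo} al {hi}"
--
--
-- def format_dates(dias):
--     if len(dias) == 1: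
--         return dias[0]
--     if len(dias) == 2:
--         return f"{dias[0]} y {dias[1]}"
--     ds = sorted(int(d) for d in dias)
--     # single backward pass building the final string directly: no run sublists,
--     # no parts list; each run is rendered from its two endpoints only, and the
--     # " y "/", " separator is decided as the string grows right-to-left.
--     out = ""
--     last = ds[-1]   # high end of the run being scanned
--     lo = last       # low end reached so far
--     first_sep = True
--     for v in reversed(ds[:-1]):
--         if v + 1 == lo:
--             lo = v
--         else:
--             out = (" y " if first_sep else ", ") + _run(lo, last) + out
--             first_sep = False
--             last = lo = v
--     return _run(lo, last) + out
-- ===== Notes on version B (the rewrite author's own statement) =====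
-- stated objective: alternative
-- what changed: A builds run sublists with a forward two-phase loop, formats them into a parts list using sublist lengths, then joins the parts with a three-way length case split; B makes one backward pass over the sorted values that builds the final string directly (no run lists, no parts list), rendering each run from its two endpoints and choosing the ' y '/', ' separator as the string grows right-to-left.
import Mathlib
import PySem

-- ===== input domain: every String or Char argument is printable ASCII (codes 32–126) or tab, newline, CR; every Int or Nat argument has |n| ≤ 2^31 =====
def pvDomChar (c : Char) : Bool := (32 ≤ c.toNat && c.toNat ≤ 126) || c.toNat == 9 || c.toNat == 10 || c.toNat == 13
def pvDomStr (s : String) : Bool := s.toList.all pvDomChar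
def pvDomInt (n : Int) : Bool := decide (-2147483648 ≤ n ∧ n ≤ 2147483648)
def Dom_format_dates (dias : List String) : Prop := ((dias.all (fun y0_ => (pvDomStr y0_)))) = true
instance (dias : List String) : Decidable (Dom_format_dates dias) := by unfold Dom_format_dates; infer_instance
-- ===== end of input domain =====

-- B replaces A's forward run-sublist/parts-list construction with one backward pass that builds the final string directly from run endpoints; alternative decomposition, same cost.


-- ===== PORT A =====
-- formatting of one run sublist, as in A's 'for seq in secuencias' body
def fmtSeqA (seq : List Int) : String :=
  if seq.length = 1 then PySem.Int.toStr (PySem.List.pyGetD seq 0 0)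
  else if seq.length = 2 then
    PySem.Int.toStr (PySem.List.pyGetD seq 0 0) ++ " y " ++ PySem.Int.toStr (PySem.List.pyGetD seq 1 0)
  else
    PySem.Int.toStr (PySem.List.pyGetD seq 0 0) ++ " al " ++ PySem.Int.toStr (PySem.List.pyGetD seq (-1) 0)

-- A's loop body over i in range(1, len(dias_ordenados)); state = (secuencias, secuencia_actual)
def stepA (ds : List Int) (st : List (List Int) × List Int) (i : Int) : List (List Int) × List Int :=
  if PySem.List.pyGetD ds i 0 = PySem.List.pyGetD ds (i - 1) 0 + 1 then
    (st.1, st.2 ++ [PySem.List.pyGetD ds i 0])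
  else
    if st.2.length > 0 then (st.1 ++ [st.2], [PySem.List.pyGetD ds i 0])
    else (st.1, st.2)

def format_dates (dias : List String) : String :=
  if dias.length = 1 then PySem.List.pyGetD dias 0 ""
  else if dias.length = 2 then
    PySem.List.pyGetD dias 0 "" ++ " y " ++ PySem.List.pyGetD dias 1 ""
  else
    let dias_ordenados := PySem.List.sorted (dias.map (fun d => (PySem.Int.ofStr? d).getD 0)) (fun x => x)
    let _dias_str := dias_ordenados.map PySem.Int.toStr   -- A computes dias_str but never uses it
    let r := (PySem.List.pyRange 1 (dias_ordenados.length : Int) 1).foldl (stepA dias_ordenados)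
               ([], [PySem.List.pyGetD dias_ordenados 0 0])
    let secuencias := if r.2 ≠ [] then r.1 ++ [r.2] else r.1
    let partes := secuencias.foldl (fun ps seq => ps ++ [fmtSeqA seq]) []
    if partes.length = 1 then PySem.List.pyGetD partes 0 ""
    else if partes.length = 2 then
      PySem.List.pyGetD partes 0 "" ++ " y " ++ PySem.List.pyGetD partes 1 ""
    else
      PySem.Str.join ", " (PySem.List.slice partes none (some (-1))) ++ " y " ++ PySem.List.pyGetD partes (-1) ""

-- ===== PORT B =====
-- _run in Source B: render one run of consecutive values from its two endpoints
def runStr (lo hi : Int) : String :=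
  if lo = hi then PySem.Int.toStr lo
  else if hi = lo + 1 then PySem.Int.toStr lo ++ " y " ++ PySem.Int.toStr hi
  else PySem.Int.toStr lo ++ " al " ++ PySem.Int.toStr hi

-- B's loop body over v in reversed(ds[:-1]); state = (out, last, lo, first_sep)
def stepB (st : String × Int × Int × Bool) (v : Int) : String × Int × Int × Bool :=
  if v + 1 = st.2.2.1 then (st.1, st.2.1, v, st.2.2.2)
  else ((if st.2.2.2 then " y " else ", ") ++ runStr st.2.2.1 st.2.1 ++ st.1, v, v, false)

def format_dates_alt (dias : List String) : String :=
  if dias.length = 1 then PySem.List.pyGetD dias 0 ""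
  else if dias.length = 2 then
    PySem.List.pyGetD dias 0 "" ++ " y " ++ PySem.List.pyGetD dias 1 ""
  else
    let ds := PySem.List.sorted (dias.map (fun d => (PySem.Int.ofStr? d).getD 0)) (fun x => x)
    let z := PySem.List.pyGetD ds (-1) 0
    let st := (PySem.List.slice ds none (some (-1))).reverse.foldl stepB ("", z, z, true)
    runStr st.2.2.1 st.2.1 ++ st.1

-- ===== PRECONDITION & SPEC =====
-- Pre_ excludes exactly the inputs where A raises: the empty list (IndexError on dias_ordenados[0])
-- and lists of length ≥ 3 containing a string int() rejects (ValueError).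
def Pre_format_dates (dias : List String) : Prop :=
  dias ≠ [] ∧ (dias.length ≤ 2 ∨ ∀ d ∈ dias, (PySem.Int.ofStr? d).isSome = true)
instance (dias : List String) : Decidable (Pre_format_dates dias) := by
  unfold Pre_format_dates; infer_instance
def pvWitness_format_dates : List String := ["3", "1", "2", "7"]
def Spec_format_dates (dias : List String) (out : String) : Prop := out = format_dates_alt dias
instance (dias : List String) (out : String) : Decidable (Spec_format_dates dias out) := by unfold Spec_format_dates; infer_instance

-- ===== CLAIM (what is proved, stated in full; the proofs are below) =====
def Claim_equal_format_dates : Prop := ∀ (dias : List String), Dom_format_dates dias → Pre_format_dates dias → Spec_format_dates dias (format_dates dias)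

-- ===== LEMMAS AND PROOFS =====

-- model: the (low, high) endpoints of the maximal +1-runs of lo :: hi-extension :: t
def runsF (lo hi : Int) : List Int → List (Int × Int)
  | [] => [(lo, hi)]
  | v :: t => if v = hi + 1 then runsF lo v t else (lo, hi) :: runsF v v t

-- the string B appends to the right of the leftmost run: separators before each later run
def sepjoinS : List String → String
  | [] => ""
  | x :: r => (if r = [] then " y " else ", ") ++ x ++ sepjoinS r

theorem runsF_shape (t : List Int) : ∀ (lo hi : Int), ∃ e R, runsF lo hi t = (lo, e) :: R := by
  induction t with
  | nil => intro lo hi; exact ⟨hi, [], rfl⟩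
  | cons v t ih =>
    intro lo hi
    rw [runsF]
    by_cases h : v = hi + 1
    · rw [if_pos h]; exact ih lo v
    · rw [if_neg h]; exact ⟨hi, runsF v v t, rfl⟩

theorem runsF_change_lo (t : List Int) : ∀ (hi lo lo' e : Int) (R : List (Int × Int)),
    runsF lo hi t = (lo, e) :: R → runsF lo' hi t = (lo', e) :: R := by
  induction t with
  | nil =>
    intro hi lo lo' e R h
    rw [runsF] at h ⊢
    obtain ⟨h1, h2⟩ := List.cons.injEq _ _ _ _ ▸ h
    rw [Prod.mk.injEq] at h1
    rw [h1.2, h2]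
  | cons v t ih =>
    intro hi lo lo' e R h
    rw [runsF] at h ⊢
    by_cases hc : v = hi + 1
    · rw [if_pos hc] at h ⊢; exact ih v lo lo' e R h
    · rw [if_neg hc] at h ⊢
      obtain ⟨h1, h2⟩ := List.cons.injEq _ _ _ _ ▸ h
      rw [Prod.mk.injEq] at h1
      rw [h1.2, h2]

theorem fmt_eq (cur : List Int) (first prev : Int)
    (h1 : cur.head? = some first) (h2 : cur.getLast? = some prev)
    (h3 : (cur.length : Int) = prev - first + 1) :
    fmtSeqA cur = runStr first prev := by
  match cur with
  | [] => simp at h1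
  | [a] =>
    have ha : a = first := by simpa using h1
    have hb : a = prev := by simpa using h2
    rw [← ha, ← hb]
    simp [fmtSeqA, runStr, PySem.List.pyGetD_zero_cons]
  | [a, b] =>
    have ha : a = first := by simpa using h1
    have hb : b = prev := by simpa using h2
    have hord : b = a + 1 := by
      simp only [List.length_cons, List.length_nil] at h3; push_cast at h3; omega
    rw [← ha, ← hb, fmtSeqA, runStr]
    rw [if_neg (show ¬ ([a, b].length = 1) by simp), if_pos (show [a, b].length = 2 by simp)]
    rw [if_neg (show ¬ a = b by omega), if_pos hord]
    simp [pysem]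
  | a :: b :: c :: r =>
    have ha : a = first := by simpa using h1
    have hne : (a :: b :: c :: r) ≠ [] := by simp
    have hbig : a + 2 ≤ prev := by
      simp only [List.length_cons] at h3; push_cast at h3; omega
    rw [← ha, fmtSeqA, runStr]
    have c1 : ¬ ((a :: b :: c :: r).length = 1) := by simp
    have c2 : ¬ ((a :: b :: c :: r).length = 2) := by simp
    have c3 : ¬ (a = prev) := by omega
    have c4 : ¬ (prev = a + 1) := by omega
    rw [if_neg c1, if_neg c2, if_neg c3, if_neg c4]
    have hg : PySem.List.pyGetD (a :: b :: c :: r) (-1) 0 = prev := by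
      rw [PySem.List.pyGetD_neg_one (h := hne)]
      exact (List.getLast?_eq_some_getLast hne ▸ h2 |> Option.some.inj)
    rw [hg, PySem.List.pyGetD_zero_cons]

-- A's index loop over range(j, len ds): its parts are the rendered runs of the model
theorem A_loop (ds : List Int) (t : List Int) :
    ∀ (j : Nat) (secs : List (List Int)) (cur : List Int) (first prev : Int),
    1 ≤ j → ds.drop (j - 1) = prev :: t →
    cur.head? = some first → cur.getLast? = some prev →
    (cur.length : Int) = prev - first + 1 →
    (let r := (PySem.List.pyRange (j : Int) (ds.length : Int) 1).foldl (stepA ds) (secs, cur)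
     r.2 ≠ [] ∧ (r.1 ++ [r.2]).map fmtSeqA
       = secs.map fmtSeqA ++ (runsF first prev t).map (fun p => runStr p.1 p.2)) := by
  induction t with
  | nil =>
    intro j secs cur first prev hj hdrop h1 h2 h3
    have hjlen : j - 1 ≤ ds.length ∧ ds.length - (j - 1) = 1 := by
      constructor
      · by_contra h
        rw [List.drop_eq_nil_of_le (by omega)] at hdrop; simp at hdrop
      · have := congrArg List.length hdrop
        simpa using this
    have hlen : (ds.length : Int) = (j : Int) := by omega
    rw [hlen, PySem.List.pyRange_one_eq_nil (le_refl _)]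
    simp only [List.foldl_nil]
    refine ⟨by rintro rfl; simp at h1, ?_⟩
    simp only [List.map_append, List.map_cons, List.map_nil, runsF]
    rw [fmt_eq cur first prev h1 h2 h3]
  | cons v t' ih =>
    intro j secs cur first prev hj hdrop h1 h2 h3
    have hcne : cur ≠ [] := by rintro rfl; simp at h1
    have hjlen : j - 1 ≤ ds.length ∧ ds.length - (j - 1) = t'.length + 2 := by
      constructor
      · by_contra h
        rw [List.drop_eq_nil_of_le (by omega)] at hdrop; simp at hdrop
      · have := congrArg List.length hdrop
        simpa using this
    have hdj : ds.drop j = v :: t' := by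
      have hjj : j = j - 1 + 1 := by omega
      rw [hjj, ← List.drop_drop, hdrop]; rfl
    have hprev : PySem.List.pyGetD ds ((j : Int) - 1) 0 = prev := by
      have h0 : ((j : Int) - 1) = ((j - 1 : Nat) : Int) := by omega
      have h5 : ds[(j - 1 : Nat)]? = some prev := by
        have h6 : ds[(j - 1) + 0]? = some prev := by
          rw [← List.getElem?_drop, hdrop]; rfl
        simpa using h6
      rw [h0, PySem.List.pyGetD_natCast, List.getD_eq_getElem?_getD, h5]; rfl
    have hv : PySem.List.pyGetD ds (j : Int) 0 = v := by
      have h5 : ds[j]? = some v := by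
        have h6 : ds[j + 0]? = some v := by
          rw [← List.getElem?_drop, hdj]; rfl
        simpa using h6
      rw [PySem.List.pyGetD_natCast, List.getD_eq_getElem?_getD, h5]; rfl
    rw [PySem.List.pyRange_one_cons (by omega)]
    simp only [List.foldl_cons]
    rw [runsF]
    by_cases hvp : v = prev + 1
    · have hA : stepA ds (secs, cur) (j : Int) = (secs, cur ++ [v]) := by
        rw [stepA]; simp only [hv, hprev]; rw [if_pos hvp]
      rw [hA, if_pos hvp]
      have hcast : ((j : Int) + 1) = ((j + 1 : Nat) : Int) := by omega
      rw [hcast]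
      exact ih (j + 1) secs (cur ++ [v]) first v (by omega)
        (by simpa using hdj)
        (by rw [List.head?_append_of_ne_nil _ hcne]; exact h1)
        (by simp)
        (by simp only [List.length_append, List.length_cons, List.length_nil]; push_cast; omega)
    · have hA : stepA ds (secs, cur) (j : Int) = (secs ++ [cur], [v]) := by
        rw [stepA]; simp only [hv, hprev]
        rw [if_neg hvp, if_pos (by simpa using List.length_pos_of_ne_nil hcne)]
      rw [hA, if_neg hvp]
      have hcast : ((j : Int) + 1) = ((j + 1 : Nat) : Int) := by omega
      rw [hcast]
      have hrec := ih (j + 1) (secs ++ [cur]) [v] v v (by omega) (by simpa using hdj) rfl rfl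
        (by simp)
      refine ⟨hrec.1, ?_⟩
      rw [hrec.2]
      simp only [List.map_append, List.map_cons, List.map_nil, List.append_assoc]
      rw [fmt_eq cur first prev h1 h2 h3]
      simp

-- B's backward fold: its state renders exactly the runs of u ++ [z]
theorem B_inv (z : Int) : ∀ (u : List Int),
    ∃ R,
      runsF ((u ++ [z]).headD 0) ((u ++ [z]).headD 0) ((u ++ [z]).tail)
        = ((u.foldr (fun v s => stepB s v) ("", z, z, true)).2.2.1,
           (u.foldr (fun v s => stepB s v) ("", z, z, true)).2.1) :: R
      ∧ (u.foldr (fun v s => stepB s v) ("", z, z, true)).1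
          = sepjoinS (R.map (fun p => runStr p.1 p.2))
      ∧ (u.foldr (fun v s => stepB s v) ("", z, z, true)).2.2.2 = decide (R = []) := by
  intro u
  induction u with
  | nil => exact ⟨[], rfl, rfl, rfl⟩
  | cons v u' ih =>
    obtain ⟨R', heq, hout, hfs⟩ := ih
    obtain ⟨h, t, hht⟩ : ∃ h t, u' ++ [z] = h :: t := by
      cases hu : u' ++ [z] with
      | nil => exact absurd hu (by simp)
      | cons a l => exact ⟨a, l, rfl⟩
    rw [hht] at heq
    simp only [List.headD_cons, List.tail_cons] at heq
    obtain ⟨e₀, R₀, hsh⟩ := runsF_shape t h h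
    have hlo : (u'.foldr (fun v s => stepB s v) ("", z, z, true)).2.2.1 = h := by
      rw [hsh] at heq
      exact (Prod.mk.injEq _ _ _ _ ▸ (List.cons.injEq _ _ _ _ ▸ heq).1).1.symm
    simp only [List.cons_append, hht, List.headD_cons, List.tail_cons, List.foldr_cons]
    rw [runsF]
    set st' := u'.foldr (fun v s => stepB s v) ("", z, z, true) with hst'
    rw [stepB]
    by_cases hc : v + 1 = st'.2.2.1
    · rw [if_pos hc]
      have hh : h = v + 1 := by rw [← hlo, ← hc]
      rw [if_pos hh]
      refine ⟨R', ?_, hout, hfs⟩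
      have heq' : runsF h h t = (h, st'.2.1) :: R' := by rw [heq, hlo]
      have hcl := runsF_change_lo t h h v st'.2.1 R' heq'
      show runsF v h t = (v, st'.2.1) :: R'
      exact hcl
    · rw [if_neg hc]
      have hh : ¬ (h = v + 1) := by rw [← hlo]; exact fun he => hc he.symm
      rw [if_neg hh]
      refine ⟨(h, st'.2.1) :: R', ?_, ?_, by simp⟩
      · show (v, v) :: runsF h h t = (v, v) :: (h, st'.2.1) :: R'
        rw [heq, hlo]
      · show (if st'.2.2.2 then " y " else ", ") ++ runStr st'.2.2.1 st'.2.1 ++ st'.1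
          = sepjoinS (((h, st'.2.1) :: R').map fun p => runStr p.1 p.2)
        rw [hlo, hout, hfs]
        simp only [List.map_cons, sepjoinS]
        by_cases hR : R' = []
        · simp [hR]
        · simp [hR]

theorem join_step (qs : List String) : ∀ (q p : String),
    p ++ sepjoinS (qs ++ [q]) = PySem.Str.join ", " (p :: qs) ++ (" y " ++ (q ++ "")) := by
  induction qs with
  | nil =>
    intro q p
    simp only [List.nil_append, sepjoinS]
    have hj : PySem.Str.join ", " [p] = p := by
      simp [PySem.Str.join]
    rw [hj]
    simp
  | cons x qs' ih =>
    intro q p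
    have hj : PySem.Str.join ", " (p :: x :: qs') = p ++ ", " ++ PySem.Str.join ", " (x :: qs') := by
      have h := PySem.Chars.join_cons_cons (", ".toList) p.toList x.toList (qs'.map String.toList)
      simp only [PySem.Str.join, List.map_cons, h, String.ofList_append, String.ofList_toList]
      try rw [show String.ofList ", ".toList = ", " from String.ofList_toList _]
    have hne : (qs' ++ [q]) ≠ [] := by simp
    have hsep : sepjoinS (x :: (qs' ++ [q])) = ", " ++ x ++ sepjoinS (qs' ++ [q]) := by
      simp only [sepjoinS]
      rw [if_neg hne]
    rw [List.cons_append, hsep, hj]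
    conv_lhs => rw [String.append_assoc]
    rw [ih q x]
    simp only [String.append_assoc]

-- ===== VERDICT (by name: the statement is the Claim_ definition above) =====
theorem format_dates_spec : Claim_equal_format_dates := by
  intro dias _hdom hpre
  obtain ⟨hne, -⟩ := hpre
  unfold Spec_format_dates format_dates format_dates_alt
  by_cases hl1 : dias.length = 1
  · simp only [if_pos hl1]
  by_cases hl2 : dias.length = 2
  · simp only [if_neg hl1, if_pos hl2]
  simp only [if_neg hl1, if_neg hl2]
  have hdsne : PySem.List.sorted (dias.map fun d => (PySem.Int.ofStr? d).getD 0) (fun x => x) ≠ [] := by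
    rw [Ne, PySem.List.sorted_eq_nil_iff, List.map_eq_nil_iff]
    exact hne
  obtain ⟨d0, rest, hcons⟩ : ∃ d0 rest,
      PySem.List.sorted (dias.map fun d => (PySem.Int.ofStr? d).getD 0) (fun x => x) = d0 :: rest := by
    cases h : PySem.List.sorted (dias.map fun d => (PySem.Int.ofStr? d).getD 0) (fun x => x) with
    | nil => exact absurd h hdsne
    | cons a l => exact ⟨a, l, rfl⟩
  rw [hcons]
  -- A side: its parts list is the rendered model runs
  have keyA := A_loop (d0 :: rest) rest 1 [] [d0] d0 d0 (le_refl 1) (by simp) rfl rfl (by simp)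
  simp only [Nat.cast_one, List.map_nil, List.nil_append, List.length_cons] at keyA
  obtain ⟨hr2, hparts⟩ := keyA
  rw [PySem.List.pyGetD_zero_cons, PySem.List.foldl_append_singleton_eq_map, List.nil_append]
  simp only [List.length_cons]
  rw [if_pos hr2]
  -- B side: its state renders the model runs
  have hzl := PySem.List.pyGetD_neg_one (xs := d0 :: rest) 0 (by simp)
  rw [hzl]
  simp only [PySem.List.slice_to_neg_one, List.foldl_reverse]
  set z := (d0 :: rest).getLast (by simp) with hz
  obtain ⟨R, heq, hout, hfs⟩ := B_inv z (d0 :: rest).dropLast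
  rw [List.dropLast_append_getLast (by simp)] at heq
  simp only [List.headD_cons, List.tail_cons] at heq
  set st := (d0 :: rest).dropLast.foldr (fun v s => stepB s v) ("", z, z, true) with hst
  rw [hparts, heq]
  simp only [List.map_cons]
  rw [hout]
  -- now both sides are expressed through R; case on its length
  match R with
  | [] =>
    simp [PySem.List.pyGetD_zero_cons, sepjoinS]
  | [q] =>
    simp [pysem, sepjoinS, String.append_assoc]
  | q :: q' :: R'' =>
    obtain ⟨ys, ylast, hys⟩ : ∃ ys ylast, (q :: q' :: R'').map (fun p => runStr p.1 p.2) = ys ++ [ylast] := by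
      rcases List.eq_nil_or_concat ((q :: q' :: R'').map (fun p => runStr p.1 p.2)) with h | ⟨ys, ylast, h⟩
      · simp at h
      · exact ⟨ys, ylast, by simpa using h⟩
    rw [hys]
    have hlen3 : (runStr st.2.2.1 st.2.1 :: (ys ++ [ylast])).length ≠ 1 := by
      have := congrArg List.length hys
      simp only [List.length_map, List.length_cons, List.length_append, List.length_nil] at this
      simp only [List.length_cons, List.length_append, List.length_nil]
      omega
    have hlen4 : (runStr st.2.2.1 st.2.1 :: (ys ++ [ylast])).length ≠ 2 := by
      have := congrArg List.length hys
      simp only [List.length_map, List.length_cons, List.length_append, List.length_nil] at this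
      simp only [List.length_cons, List.length_append, List.length_nil]
      omega
    rw [if_neg hlen3, if_neg hlen4]
    have hdl : (runStr st.2.2.1 st.2.1 :: (ys ++ [ylast])).dropLast
        = runStr st.2.2.1 st.2.1 :: ys := by
      rw [show runStr st.2.2.1 st.2.1 :: (ys ++ [ylast]) = (runStr st.2.2.1 st.2.1 :: ys) ++ [ylast] by simp,
        List.dropLast_concat]
    have hlast : PySem.List.pyGetD (runStr st.2.2.1 st.2.1 :: (ys ++ [ylast])) (-1) "" = ylast := by
      rw [PySem.List.pyGetD_neg_one (xs := runStr st.2.2.1 st.2.1 :: (ys ++ [ylast])) "" (by simp)]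
      simp
    rw [hdl, hlast]
    rw [join_step ys ylast (runStr st.2.2.1 st.2.1)]
    simp [String.append_assoc, String.append_empty]
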